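-- pv_equiv track=rewrite | github.com/cirosantilli/cirosantilli.github.io | euler/962.py | gen_us_from_z_factor
-- ===== SOURCE A (Python) =====
-- def gen_us_from_z_factor(z_factors: list[tuple[int, int]]) -> list[int]:
--     if not z_factors:
--         return [1]
--     bases = [p for p, _ in z_factors]
--     limits = [(2 * e) // 3 for _, e in z_factors]
--     us: list[int] = []
--     def backtrack(i: int, cur: int) -> None:
--         if i == len(bases):
--             us.append(cur)
--             return
--         p = bases[i]
--         val = 1
--         max_e = limits[i]
--         for _ in range(max_e + 1):
--             backtrack(i + 1, cur * val)
--             val *= p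
--     backtrack(0, 1)
--     return us
-- ===== SOURCE B (Python) =====
-- def gen_us_from_z_factor(z_factors: list[tuple[int, int]]) -> list[int]:
--     us = [1]
--     for p, e in z_factors:
--         if not us:
--             break
--         limit = (2 * e) // 3
--         powers = [p ** k for k in range(limit + 1)]
--         us = [prev * pw for prev in us for pw in powers]
--     return us
-- ===== Notes on version B (the rewrite author's own statement) =====
-- stated objective: simpler
-- what changed: Replaces the recursive backtracking over index/limit arrays (with a mutated accumulator and running power variable) by a level-by-level iterative cross-product: us starts as [1] and each factor multiplies it by its precomputed power list.
import Mathlib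
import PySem

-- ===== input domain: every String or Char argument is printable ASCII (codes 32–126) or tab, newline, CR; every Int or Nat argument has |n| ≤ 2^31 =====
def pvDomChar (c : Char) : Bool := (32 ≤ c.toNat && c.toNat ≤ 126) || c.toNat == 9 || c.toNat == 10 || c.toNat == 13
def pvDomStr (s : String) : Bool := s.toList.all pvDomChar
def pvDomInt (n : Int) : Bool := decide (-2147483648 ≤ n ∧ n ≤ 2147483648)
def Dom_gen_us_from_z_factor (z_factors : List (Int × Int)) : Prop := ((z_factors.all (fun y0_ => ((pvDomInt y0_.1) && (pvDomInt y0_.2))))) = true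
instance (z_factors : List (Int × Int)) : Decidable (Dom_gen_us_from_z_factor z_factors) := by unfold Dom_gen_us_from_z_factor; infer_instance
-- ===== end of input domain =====

-- B replaces A's recursive backtracking (index arrays, mutated accumulator, running power
-- variable) by an iterative level-by-level cross-product of precomputed power lists (simpler).


-- ===== PORT A =====
-- backtrack(i, cur): recursion over the (base, limit) pairs from index i on; the inner
-- `for _ in range(max_e + 1)` with its running `val *= p` is the foldl over pyRange,
-- whose state is (emitted list so far, val).
def genUsBacktrack : List (Int × Int) → Int → List Int
  | [], cur => [cur]
  | (p, m) :: rest, cur =>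
    ((PySem.List.pyRange 0 (m + 1) 1).foldl
      (fun (st : List Int × Int) _ => (st.1 ++ genUsBacktrack rest (cur * st.2), st.2 * p))
      ([], 1)).1

def gen_us_from_z_factor (z_factors : List (Int × Int)) : List Int :=
  if z_factors.isEmpty then [1]
  else
    let bases := z_factors.map (fun pe => pe.1)
    let limits := z_factors.map (fun pe => PySem.Int.floordiv (2 * pe.2) 3)
    genUsBacktrack (bases.zip limits) 1

-- ===== PORT B =====
-- the `if not us: break` short-circuit is ported as a guard in the fold step
-- (once us is empty every later step leaves it empty, so guard = break)
def genUsStep (us : List Int) (pe : Int × Int) : List Int :=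
  if us.isEmpty then us
  else
    let limit := PySem.Int.floordiv (2 * pe.2) 3
    let powers := (PySem.List.pyRange 0 (limit + 1) 1).map (fun k => pe.1 ^ k.toNat)
    us.flatMap (fun prev => powers.map (fun pw => prev * pw))

def gen_us_from_z_factor_alt (z_factors : List (Int × Int)) : List Int :=
  z_factors.foldl genUsStep [1]

-- ===== PRECONDITION & SPEC =====
def Spec_gen_us_from_z_factor (z_factors : List (Int × Int)) (out : List Int) : Prop := out = gen_us_from_z_factor_alt z_factors
instance (z_factors : List (Int × Int)) (out : List Int) : Decidable (Spec_gen_us_from_z_factor z_factors out) := by unfold Spec_gen_us_from_z_factor; infer_instance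

-- ===== CLAIM (what is proved, stated in full; the proofs are below) =====
def Claim_equal_gen_us_from_z_factor : Prop := ∀ (z_factors : List (Int × Int)), Dom_gen_us_from_z_factor z_factors → Spec_gen_us_from_z_factor z_factors (gen_us_from_z_factor z_factors)

-- ===== LEMMAS AND PROOFS =====

-- A's inner loop: the foldl over any index list emits, in order, F (val * p^k) for k < length.
theorem foldl_emit (F : Int → List Int) (p : Int) :
    ∀ (ks : List Int) (acc : List Int) (val : Int),
      (ks.foldl (fun (st : List Int × Int) _ => (st.1 ++ F st.2, st.2 * p)) (acc, val)).1
        = acc ++ ((List.range ks.length).map (fun k => val * p ^ k)).flatMap F := by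
  intro ks
  induction ks with
  | nil => intro acc val; simp
  | cons k ks ih =>
      intro acc val
      simp only [List.foldl_cons, ih, List.length_cons, List.range_succ_eq_map,
        List.map_cons, List.flatMap_cons, List.map_map]
      rw [List.append_assoc]
      have hmap : ((fun k => val * p ^ k) ∘ Nat.succ) = (fun k => val * p * p ^ k) := by
        funext j; simp [Function.comp, pow_succ]; ring
      rw [hmap]
      congr 1
      simp

theorem foldl_step_nil : ∀ (l : List (Int × Int)), l.foldl genUsStep [] = [] := by
  intro l
  induction l with
  | nil => rfl
  | cons pe rest ih => simp [List.foldl_cons, genUsStep, ih]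

-- B's foldl, started from any list, flat-maps A's backtracking over the mapped pairs.
theorem foldl_eq_flatMap_backtrack :
    ∀ (l : List (Int × Int)) (us : List Int),
      l.foldl genUsStep us
        = us.flatMap (fun u =>
            genUsBacktrack (l.map (fun pe => (pe.1, PySem.Int.floordiv (2 * pe.2) 3))) u) := by
  intro l
  induction l with
  | nil => intro us; simp [genUsBacktrack]
  | cons pe rest ih =>
      intro us
      by_cases hus : us = []
      · subst hus; rw [foldl_step_nil]; simp
      rw [List.foldl_cons]
      rw [show genUsStep us pe = us.flatMap (fun prev =>
            ((PySem.List.pyRange 0 (PySem.Int.floordiv (2 * pe.2) 3 + 1) 1).map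
              (fun k => pe.1 ^ k.toNat)).map (fun pw => prev * pw)) from by
        simp [genUsStep, List.isEmpty_iff, hus]]
      rw [ih, List.flatMap_assoc]
      congr 1
      funext u
      rw [List.map_cons]
      show _ = genUsBacktrack ((pe.1, PySem.Int.floordiv (2 * pe.2) 3) :: _) u
      rw [genUsBacktrack,
        foldl_emit (fun v => genUsBacktrack (rest.map (fun pe => (pe.1, PySem.Int.floordiv (2 * pe.2) 3))) (u * v)) pe.1]
      simp only [List.nil_append, PySem.List.pyRange_one, List.flatMap_map, List.map_map,
        List.length_map, List.length_range]
      congr 1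
      funext k
      simp [Function.comp]

theorem zip_bases_limits (z : List (Int × Int)) :
    (z.map (fun pe => pe.1)).zip (z.map (fun pe => PySem.Int.floordiv (2 * pe.2) 3))
      = z.map (fun pe => (pe.1, PySem.Int.floordiv (2 * pe.2) 3)) := by
  rw [List.zip_map']

-- ===== VERDICT (by name: the statement is the Claim_ definition above) =====
theorem gen_us_from_z_factor_spec : Claim_equal_gen_us_from_z_factor := by
  intro z _
  show gen_us_from_z_factor z = gen_us_from_z_factor_alt z
  unfold gen_us_from_z_factor gen_us_from_z_factor_alt
  rw [foldl_eq_flatMap_backtrack]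
  simp only [List.flatMap_cons, List.flatMap_nil, List.append_nil]
  cases z with
  | nil => simp [genUsBacktrack]
  | cons pe rest =>
      simp only [List.isEmpty_cons, Bool.false_eq_true, if_false]
      rw [zip_bases_limits]
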